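-- pv_equiv track=rewrite | github.com/twickatwk/codingchallenges | Algoexpert/Strings/patternMatcher.py | getCountAndFirstY
-- ===== SOURCE A (Python) =====
-- def getCountAndFirstY(arr):
--     dict_count = {}
--     firstY = None
--     for i, value in enumerate(arr):
--         if value not in dict_count:
--             if value == 'y':
--                 firstY = i
--             dict_count[value] = 1
--         else:
--             dict_count[value] += 1
--
--     return dict_count, firstY
-- ===== SOURCE B (Python) =====
-- def getCountAndFirstY(arr):
--     # Two independent passes: a counting dict comprehension over the ordered
--     # distinct values, then a separate search for the first 'y'.
--     counts = {value: arr.count(value) for value in dict.fromkeys(arr)}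
--     firstY = arr.index('y') if 'y' in arr else None
--     return counts, firstY
-- ===== Notes on version B (the rewrite author's own statement) =====
-- stated objective: simpler
-- what changed: Replaces A's single fused loop carrying a dict and a firstY flag with a declarative decomposition: a dict comprehension {v: arr.count(v) for v in dict.fromkeys(arr)} over the ordered distinct values, plus a separate arr.index('y') lookup.
import Mathlib
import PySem

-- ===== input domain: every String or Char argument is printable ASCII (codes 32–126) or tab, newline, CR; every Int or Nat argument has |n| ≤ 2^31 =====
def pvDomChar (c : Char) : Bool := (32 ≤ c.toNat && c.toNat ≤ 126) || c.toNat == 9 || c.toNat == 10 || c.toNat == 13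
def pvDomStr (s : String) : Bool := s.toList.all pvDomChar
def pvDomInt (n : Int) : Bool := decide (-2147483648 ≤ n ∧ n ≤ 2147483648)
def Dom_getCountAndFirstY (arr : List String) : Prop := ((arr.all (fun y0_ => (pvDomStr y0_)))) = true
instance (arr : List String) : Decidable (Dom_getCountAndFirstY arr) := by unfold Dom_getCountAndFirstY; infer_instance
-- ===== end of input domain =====

-- B replaces A's fused counting-and-first-'y' loop by a dict comprehension over the
-- ordered distinct values plus a separate index lookup; objective: simpler.

-- ===== PORT A =====
-- one fused pass: `for i, value in enumerate(arr)` carrying (dict_count, firstY)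
def getCountAndFirstY (arr : List String) : (List (String × Int)) × Option Int :=
  let st := (PySem.List.enumerate arr).foldl
    (fun (st : PySem.Dict String Int × Option Int) p =>
      if st.1.contains p.2 = false then
        (st.1.insert p.2 1, if p.2 == "y" then some p.1 else st.2)
      else
        (st.1.modify p.2 0 (· + 1), st.2))
    (PySem.Dict.empty, none)
  (st.1.items, st.2)

-- ===== PORT B =====
-- `{value: arr.count(value) for value in dict.fromkeys(arr)}` then `arr.index('y') if 'y' in arr else None`
def getCountAndFirstY_alt (arr : List String) : (List (String × Int)) × Option Int :=
  let counts := (PySem.List.dedup arr).foldl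
    (fun (d : PySem.Dict String Int) v => d.insert v (arr.count v : Int)) PySem.Dict.empty
  let firstY : Option Int :=
    if "y" ∈ arr then (PySem.List.index? arr "y").map (fun n => (n : Int)) else none
  (counts.items, firstY)

-- ===== PRECONDITION & SPEC =====
def Spec_getCountAndFirstY (arr : List String) (out : (List (String × Int)) × Option Int) : Prop := out = getCountAndFirstY_alt arr
instance (arr : List String) (out : (List (String × Int)) × Option Int) : Decidable (Spec_getCountAndFirstY arr out) := by unfold Spec_getCountAndFirstY; infer_instance

-- ===== CLAIM (what is proved, stated in full; the proofs are below) =====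
def Claim_equal_getCountAndFirstY : Prop := ∀ (arr : List String), Dom_getCountAndFirstY arr → Spec_getCountAndFirstY arr (getCountAndFirstY arr)

-- ===== LEMMAS AND PROOFS =====

-- A dict modification `d[v] = d.get(v, 0) + 1` on an absent key is an insert of 1
theorem modify_absent (d : PySem.Dict String Int) (v : String) (h : d.contains v = false) :
    d.modify v 0 (· + 1) = d.insert v 1 := by
  simp [PySem.Dict.modify, PySem.Dict.insert, h, PySem.Dict.getD_of_not_contains d (0 : Int) h]

-- invariant of A's fused loop: the dict is the Counter fold, and firstY is the
-- (offset) index of the first 'y' unless 'y' was already seen (then it is kept)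
theorem loopA_inv (arr : List String) :
    ∀ (i : Int) (d : PySem.Dict String Int) (fy : Option Int),
    (PySem.List.enumerate arr i).foldl
      (fun (st : PySem.Dict String Int × Option Int) p =>
        if st.1.contains p.2 = false then
          (st.1.insert p.2 1, if p.2 == "y" then some p.1 else st.2)
        else
          (st.1.modify p.2 0 (· + 1), st.2))
      (d, fy)
    = (arr.foldl (fun d v => d.modify v 0 (· + 1)) d,
       if d.contains "y" = true then fy
       else match PySem.List.index? arr "y" with
            | some n => some (i + n)
            | none => fy) := by
  induction arr with
  | nil => intro i d fy; simp [PySem.List.enumerate_nil, PySem.List.index?]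
  | cons x xs ih =>
    intro i d fy
    rw [PySem.List.enumerate_cons, List.foldl_cons, List.foldl_cons]
    by_cases hc : d.contains x = false
    · rw [if_pos hc, ih, modify_absent d x hc]
      by_cases hx : x = "y"
      · subst hx
        rw [PySem.List.index?_cons_self]
        have hdy : d.contains "y" = false := hc
        simp [hdy]
      · rw [PySem.List.index?_cons_of_ne xs hx]
        have h1 : (x == "y") = false := by simp [hx]
        simp only [h1, Bool.false_eq_true, if_false, PySem.Dict.contains_insert]
        have h2 : ("y" == x) = false := by simp [Ne.symm hx]
        simp only [h2, Bool.false_or]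
        cases hidx : PySem.List.index? xs "y" with
        | none => simp
        | some n =>
          simp only [Option.map_some]
          by_cases hdy : d.contains "y" = true
          · simp [hdy]
          · simp only [hdy]
            push_cast
            ring_nf
    · rw [if_neg hc, ih]
      have hc' : d.contains x = true := by
        cases h : d.contains x
        · exact absurd h hc
        · rfl
      rw [PySem.Dict.contains_modify]
      by_cases hdy : d.contains "y" = true
      · have : ("y" == x || d.contains "y") = true := by simp [hdy]
        simp [hdy]
      · have hx : x ≠ "y" := by
          intro h; rw [h] at hc'; exact hdy hc'
        have h2 : ("y" == x) = false := by simp [Ne.symm hx]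
        simp only [h2, Bool.false_or, hdy]
        rw [PySem.List.index?_cons_of_ne xs hx]
        cases hidx : PySem.List.index? xs "y" with
        | none => simp
        | some n =>
          simp only [Option.map_some]
          push_cast
          ring_nf

-- B's count fold materialises the counter's items
theorem altCounts_items (arr : List String) :
    ((PySem.List.dedup arr).foldl
      (fun (d : PySem.Dict String Int) v => d.insert v (arr.count v : Int)) PySem.Dict.empty).items
    = (PySem.List.dedup arr).map (fun v => (v, (arr.count v : Int))) := by
  have h := PySem.Dict.items_foldl_insert_fresh (l := PySem.List.dedup arr)
    (k := fun v => v) (v := fun v => (arr.count v : Int)) (d := PySem.Dict.empty)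
    (by intro a _; simp) (by simp [PySem.Set.nodup_ofList arr])
  simp at h
  exact h

-- A's count fold is collections.Counter
theorem aCounts_items (arr : List String) :
    (arr.foldl (fun (d : PySem.Dict String Int) v => d.modify v 0 (· + 1)) PySem.Dict.empty).items
    = (PySem.List.dedup arr).map (fun v => (v, (arr.count v : Int))) := by
  rw [← PySem.Dict.counter_eq_foldl, PySem.Dict.items_counter]
  rfl

-- ===== VERDICT (by name: the statement is the Claim_ definition above) =====
theorem getCountAndFirstY_spec : Claim_equal_getCountAndFirstY := by
  intro arr _
  unfold Spec_getCountAndFirstY getCountAndFirstY getCountAndFirstY_alt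
  rw [loopA_inv arr 0 PySem.Dict.empty none]
  simp only [PySem.Dict.contains_empty, Bool.false_eq_true, if_false]
  refine Prod.ext ?_ ?_
  · rw [altCounts_items arr, aCounts_items arr]
  · cases hidx : PySem.List.index? arr "y" with
    | none =>
      have hm : "y" ∉ arr := (PySem.List.index?_eq_none_iff arr "y").mp hidx
      simp [hm]
    | some n =>
      have hm : "y" ∈ arr := (PySem.List.index?_isSome_iff arr "y").mp (by rw [hidx]; rfl)
      simp [hm]
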